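-- pv_equiv track=rewrite | github.com/wrq/pyjunk | xordle/xordle.py | process_guess
-- ===== SOURCE A (Python) =====
-- def process_guess(guess: str, word: str):
--     res = []
--     for index, letter in enumerate(guess):
--         if letter == word[index]:
--             res.append(("green", letter))
--         elif letter in word and word[index] != letter and guess[:index + 1].count(letter) <= word.count(letter):
--             res.append(("yellow", letter))
--         elif letter in word and word[index] != letter and guess[:index + 1].count(letter) >  word.count(letter):
--             res.append(("grey", letter))
--         elif letter not in word:
--             res.append(("grey", letter))
--     return res
-- ===== SOURCE B (Python) =====
-- def process_guess(guess: str, word: str):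
--     # Letter-major scatter: for each distinct letter, colour all its occurrences
--     # at once by occurrence rank against the word's count of that letter, writing
--     # into a preallocated output array (no per-position prefix/word rescans).
--     out = [None] * len(guess)
--     for c in set(guess):
--         quota = word.count(c)
--         positions = [i for i, x in enumerate(guess) if x == c]
--         for rank, i in enumerate(positions, 1):
--             if word[i] == c:
--                 out[i] = ("green", c)
--             elif rank <= quota:
--                 out[i] = ("yellow", c)
--             else:
--                 out[i] = ("grey", c)
--     return out
-- ===== Notes on version B (the rewrite author's own statement) =====
-- stated objective: alternative
-- what changed: Inverts the traversal: instead of A's position-major loop that rescans the guess prefix and the whole word at every index, B iterates over the distinct letters of the guess, computes each letter's occurrence positions once, and scatters colours into a preallocated output array by occurrence rank against the word's count of that letter.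
import Mathlib
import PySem

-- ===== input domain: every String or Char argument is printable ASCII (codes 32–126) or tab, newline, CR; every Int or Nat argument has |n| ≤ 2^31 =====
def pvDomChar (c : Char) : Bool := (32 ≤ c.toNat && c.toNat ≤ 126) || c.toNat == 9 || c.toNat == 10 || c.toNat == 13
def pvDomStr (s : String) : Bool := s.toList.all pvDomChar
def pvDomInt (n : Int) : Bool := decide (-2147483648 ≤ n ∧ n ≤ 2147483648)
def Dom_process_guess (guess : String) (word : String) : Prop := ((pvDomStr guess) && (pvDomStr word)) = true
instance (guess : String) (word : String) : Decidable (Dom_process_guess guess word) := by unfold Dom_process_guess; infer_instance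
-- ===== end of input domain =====

-- B inverts the traversal: a letter-major scatter by occurrence rank instead of A's
-- position-major loop with prefix/word rescans (objective: alternative, not claimed faster).

-- ===== PORT A =====
-- letters are single chars; Python 'letter in word' / '.count(letter)' on 1-char
-- strings coincide exactly with List membership / List.count on the char lists.
def process_guess (guess : String) (word : String) : List (String × String) :=
  let g := guess.toList
  let w := word.toList
  (PySem.List.enumerate g 0).foldl (fun res p =>
    match PySem.List.pyGet? w p.1 with
    | none => res  -- Python raises IndexError here; Pre_ excludes these inputs
    | some wi =>
      if p.2 = wi then
        res ++ [("green", String.ofList [p.2])]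
      else if p.2 ∈ w ∧ wi ≠ p.2 ∧ (PySem.List.slice g none (some (p.1 + 1))).count p.2 ≤ w.count p.2 then
        res ++ [("yellow", String.ofList [p.2])]
      else if p.2 ∈ w ∧ wi ≠ p.2 ∧ (PySem.List.slice g none (some (p.1 + 1))).count p.2 > w.count p.2 then
        res ++ [("grey", String.ofList [p.2])]
      else if p.2 ∉ w then
        res ++ [("grey", String.ofList [p.2])]
      else res) []

-- ===== PORT B =====
-- 'out = [None]*n … return out' : a list of Options; the final map (·.getD ("",""))
-- only discharges the Option type — every slot was written, because every position's
-- letter is one of the iterated distinct letters (proved below).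
-- 'for c in set(guess)': the result does not depend on the set's iteration order
-- (each letter writes its own, disjoint, positions), so first-occurrence order is exact.
def process_guess_alt (guess : String) (word : String) : List (String × String) :=
  let g := guess.toList
  let w := word.toList
  let out := (PySem.Set.ofList g).foldl (fun out c =>
    let quota := (w.count c : Int)
    let positions := (PySem.List.enumerate g 0).filterMap (fun p => if p.2 = c then some p.1 else none)
    (PySem.List.enumerate positions 1).foldl (fun out q =>
      match PySem.List.pyGet? w q.2 with
      | none => out  -- Python raises IndexError here; Pre_ excludes these inputs
      | some wi =>
        out.set q.2.toNat (some (if wi = c then ("green", String.ofList [c])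
          else if q.1 ≤ quota then ("yellow", String.ofList [c])
          else ("grey", String.ofList [c])))) out)
    (List.replicate g.length (none : Option (String × String)))
  out.map (fun o => o.getD ("", ""))

-- ===== PRECONDITION & SPEC =====
-- A indexes word[index] for every guess position: it raises IndexError when the
-- guess is longer than the word; exactly those inputs are excluded.
def Pre_process_guess (guess : String) (word : String) : Prop :=
  guess.toList.length ≤ word.toList.length
instance (guess : String) (word : String) : Decidable (Pre_process_guess guess word) := by
  unfold Pre_process_guess; infer_instance
def pvWitness_process_guess : String × String := ("abcae", "cabbe")

def Spec_process_guess (guess : String) (word : String) (out : List (String × String)) : Prop := out = process_guess_alt guess word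
instance (guess : String) (word : String) (out : List (String × String)) : Decidable (Spec_process_guess guess word out) := by unfold Spec_process_guess; infer_instance

-- ===== CLAIM (what is proved, stated in full; the proofs are below) =====
def Claim_equal_process_guess : Prop := ∀ (guess : String) (word : String), Dom_process_guess guess word → Pre_process_guess guess word → Spec_process_guess guess word (process_guess guess word)

-- ===== LEMMAS AND PROOFS =====

-- the colour of position j; both ports are reduced to this common specification
def pvVal (g w : List Char) (j : Nat) : String × String :=
  let c := g.getD j 'a'
  if c = w.getD j 'a' then ("green", String.ofList [c])
  else if (g.take (j + 1)).count c ≤ w.count c then ("yellow", String.ofList [c])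
  else ("grey", String.ofList [c])

-- A-side: the position-major fold computes pvVal at every index
theorem pvA_fold (w g : List Char) (hlen : g.length ≤ w.length) :
    ∀ (rest pre : List Char) (res : List (String × String)),
      g = pre ++ rest →
      ((PySem.List.enumerate rest (pre.length : Int)).foldl (fun res p =>
        match PySem.List.pyGet? w p.1 with
        | none => res
        | some wi =>
          if p.2 = wi then
            res ++ [("green", String.ofList [p.2])]
          else if p.2 ∈ w ∧ wi ≠ p.2 ∧ (PySem.List.slice g none (some (p.1 + 1))).count p.2 ≤ w.count p.2 then
            res ++ [("yellow", String.ofList [p.2])]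
          else if p.2 ∈ w ∧ wi ≠ p.2 ∧ (PySem.List.slice g none (some (p.1 + 1))).count p.2 > w.count p.2 then
            res ++ [("grey", String.ofList [p.2])]
          else if p.2 ∉ w then
            res ++ [("grey", String.ofList [p.2])]
          else res) res)
      = res ++ (List.range' pre.length rest.length).map (pvVal g w) := by
  intro rest
  induction rest with
  | nil => intro pre res hg; simp [PySem.List.enumerate]
  | cons c rest' ih =>
    intro pre res hg
    have hpre : pre.length < w.length := by
      have : g.length = pre.length + (rest'.length + 1) := by simp [hg]
      omega
    rw [PySem.List.enumerate_cons, List.foldl_cons]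
    have hget : PySem.List.pyGet? w ((pre.length : Nat) : Int) = some (w[pre.length]'hpre) := by
      simp [hpre]
    have hslice : PySem.List.slice g none (some ((pre.length : Int) + 1)) = pre ++ [c] := by
      rw [show ((pre.length : Int) + 1) = ((pre.length + 1 : Nat) : Int) by push_cast; ring,
          PySem.List.slice_to_natCast, hg]
      simp [List.take_append]
    have hg' : g = (pre ++ [c]) ++ rest' := by simpa using hg
    have hrec := fun r => ih (pre ++ [c]) r hg'
    simp only [List.length_append, List.length_cons, List.length_nil, Nat.zero_add,
      Nat.cast_add, Nat.cast_one] at hrec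
    have hgetd : g.getD pre.length 'a' = c := by
      rw [hg]
      simp [List.getD_eq_getElem?_getD]
    have hwgetd : w.getD pre.length 'a' = w[pre.length]'hpre := List.getD_eq_getElem w 'a' hpre
    have htake : g.take (pre.length + 1) = pre ++ [c] := by
      rw [hg]; simp [List.take_append]
    have hcnt : (pre ++ [c]).count c = pre.count c + 1 := by simp [List.count_append]
    have hval : pvVal g w pre.length =
        (if c = w[pre.length]'hpre then ("green", String.ofList [c])
         else if pre.count c + 1 ≤ w.count c then ("yellow", String.ofList [c])
         else ("grey", String.ofList [c])) := by
      simp only [pvVal, hgetd, hwgetd, htake, hcnt]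
    simp only [hget, hslice, List.length_cons]
    set wi := w[pre.length]'hpre with hwi
    rw [List.range'_succ, List.map_cons]
    by_cases h1 : c = wi
    · rw [if_pos h1, hrec, hval, if_pos h1]
      simp
    · rw [if_neg h1]
      by_cases h2 : c ∈ w
      · have hne : wi ≠ c := fun h => h1 h.symm
        by_cases h3 : pre.count c + 1 ≤ w.count c
        · rw [if_pos ⟨h2, hne, by rw [hcnt]; exact h3⟩, hrec, hval, if_neg h1, if_pos h3]
          simp
        · rw [if_neg (fun h => h3 (hcnt ▸ h.2.2)),
              if_pos ⟨h2, hne, by rw [hcnt]; omega⟩, hrec, hval, if_neg h1, if_neg h3]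
          simp
      · have h3 : ¬ (pre.count c + 1 ≤ w.count c) := by
          rw [List.count_eq_zero_of_not_mem h2]; omega
        rw [if_neg (fun h => h2 h.1), if_neg (fun h => h2 h.1), if_pos h2, hrec, hval,
            if_neg h1, if_neg h3]
        simp

-- B-side: occurrence positions of letter c in g, front to back
def pvOccs (g : List Char) (c : Char) : List Nat :=
  match g with
  | [] => []
  | x :: xs => if x = c then 0 :: (pvOccs xs c).map (· + 1) else (pvOccs xs c).map (· + 1)

theorem pvShift (l : List Nat) (b : Int) :
    (l.map (· + 1)).map (fun i : Nat => ((i : Int) + b)) = l.map (fun i : Nat => ((i : Int) + (b + 1))) := by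
  rw [List.map_map]
  apply List.map_congr_left
  intro a _
  simp only [Function.comp_apply]
  push_cast; ring

theorem pvOccs_eq (c : Char) :
    ∀ (g : List Char) (k : Int),
      (PySem.List.enumerate g k).filterMap (fun p => if p.2 = c then some p.1 else none)
      = (pvOccs g c).map (fun i : Nat => ((i : Int) + k)) := by
  intro g
  induction g with
  | nil => intro k; simp [pvOccs, PySem.List.enumerate]
  | cons x xs ih =>
    intro k
    rw [PySem.List.enumerate_cons, List.filterMap_cons]
    by_cases hx : x = c
    · subst hx
      simp only [pvOccs, ih]
      simp
      intro a _
      ring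
    · simp only [pvOccs, if_neg hx, ih, pvShift]

theorem pvOccs_lt (c : Char) : ∀ (g : List Char), ∀ j ∈ pvOccs g c, j < g.length := by
  intro g
  induction g with
  | nil => simp [pvOccs]
  | cons x xs ih =>
    intro j hj
    simp only [pvOccs] at hj
    simp only [List.length_cons]
    by_cases hx : x = c
    · rw [if_pos hx] at hj
      rcases List.mem_cons.mp hj with rfl | hm
      · omega
      · obtain ⟨a, ha, rfl⟩ := List.mem_map.mp hm
        have := ih a ha; omega
    · rw [if_neg hx] at hj
      obtain ⟨a, ha, rfl⟩ := List.mem_map.mp hj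
      have := ih a ha; omega

theorem pvOccs_pairwise (c : Char) : ∀ (g : List Char), (pvOccs g c).Pairwise (· < ·) := by
  intro g
  induction g with
  | nil => simp [pvOccs]
  | cons x xs ih =>
    simp only [pvOccs]
    have hmap : ((pvOccs xs c).map (· + 1)).Pairwise (· < ·) :=
      List.pairwise_map.mpr (ih.imp (by omega))
    by_cases hx : x = c
    · rw [if_pos hx]
      refine List.pairwise_cons.mpr ⟨?_, hmap⟩
      intro a ha
      obtain ⟨b, _, rfl⟩ := List.mem_map.mp ha
      omega
    · rw [if_neg hx]; exact hmap

-- find? on the rank-enumerated occurrence list: at j it yields the prefix count of c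
theorem pvFindG (c : Char) :
    ∀ (g : List Char) (b k : Int) (j : Nat), j < g.length →
      (PySem.List.enumerate ((pvOccs g c).map (fun i : Nat => ((i : Int) + b))) k).find?
          (fun q => q.2 == (j : Int) + b)
      = if g.getD j 'a' = c then
          some (k - 1 + ((g.take (j + 1)).count c : Int), (j : Int) + b)
        else none := by
  intro g
  induction g with
  | nil => intro b k j hj; simp at hj
  | cons x xs ih =>
    intro b k j hj
    by_cases hx : x = c
    · subst hx
      simp only [pvOccs, if_true, List.map_cons, PySem.List.enumerate_cons]
      cases j with
      | zero =>
        rw [List.find?_cons_of_pos (by simp)]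
        have hc1 : List.count x (List.take (0 + 1) (x :: xs)) = 1 := by simp
        rw [if_pos (by simp), hc1]
        simp only [Option.some_inj, Prod.mk.injEq]
        constructor
        · push_cast; ring
        · trivial
      | succ j' =>
        have hAB : ((j' + 1 : Nat) : Int) + b = (j' : Int) + (b + 1) := by push_cast; ring
        rw [List.find?_cons_of_neg (by simp; omega), pvShift]
        simp only [Nat.cast_add, Nat.cast_one]
        rw [show ((j' : Int) + 1 + b) = (j' : Int) + (b + 1) by ring,
            ih (b + 1) (k + 1) j' (by simpa using hj)]
        by_cases hc : xs.getD j' 'a' = x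
        · rw [if_pos hc, if_pos (by simpa using hc)]
          simp only [Option.some_inj, Prod.mk.injEq]
          constructor
          · simp only [List.take_succ_cons, List.count_cons_self]
            push_cast; ring
          · trivial
        · rw [if_neg hc, if_neg (by simpa using hc)]
    · simp only [pvOccs]
      rw [if_neg hx]
      cases j with
      | zero =>
        rw [pvShift, List.find?_eq_none.mpr, if_neg (by simpa using hx)]
        intro q hq
        obtain ⟨t, ht, hp⟩ := (PySem.List.mem_enumerate_iff _ _ _).mp hq
        have hmem : ((pvOccs xs c).map (fun i : Nat => ((i : Int) + (b + 1))))[t] ∈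
            (pvOccs xs c).map (fun i : Nat => ((i : Int) + (b + 1))) := List.getElem_mem ht
        obtain ⟨a, _, hv⟩ := List.mem_map.mp hmem
        have hq2 : q.2 = (a : Int) + (b + 1) := by rw [hp]; exact hv.symm
        simp only [beq_iff_eq, hq2]
        push_cast
        omega
      | succ j' =>
        have hAB : ((j' + 1 : Nat) : Int) + b = (j' : Int) + (b + 1) := by push_cast; ring
        rw [pvShift]
        simp only [Nat.cast_add, Nat.cast_one]
        rw [show ((j' : Int) + 1 + b) = (j' : Int) + (b + 1) by ring,
            ih (b + 1) k j' (by simpa using hj)]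
        by_cases hc : xs.getD j' 'a' = c
        · rw [if_pos hc, if_pos (by simpa using hc)]
          simp only [List.take_succ_cons, List.count_cons_of_ne hx]
        · rw [if_neg hc, if_neg (by simpa using hc)]

-- generic scatter: a fold of writes at distinct nonnegative indices, read back pointwise
theorem pvScatter {α : Type} (f : Int × Int → α) (d : α) :
    ∀ (ps : List (Int × Int)) (out0 : List α) (j : Nat),
      j < out0.length → (ps.map Prod.snd).Nodup → (∀ q ∈ ps, 0 ≤ q.2) →
      (ps.foldl (fun out q => out.set q.2.toNat (f q)) out0).getD j d =
      match ps.find? (fun q => q.2 == (j : Int)) with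
      | some q => f q
      | none => out0.getD j d := by
  intro ps
  induction ps with
  | nil => intro out0 j hj _ _; simp
  | cons q rest ih =>
    intro out0 j hj hnd hpos
    simp only [List.map_cons, List.nodup_cons] at hnd
    rw [List.foldl_cons,
        ih _ j (by simpa using hj) hnd.2 (fun q' h => hpos q' (List.mem_cons_of_mem _ h))]
    by_cases hq : q.2 = (j : Int)
    · rw [List.find?_cons_of_pos (by simp [hq])]
      have hnone : rest.find? (fun q' => q'.2 == (j : Int)) = none := by
        apply List.find?_eq_none.mpr
        intro q' hq'
        simp only [beq_iff_eq]
        intro h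
        exact hnd.1 (by rw [hq, ← h]; exact List.mem_map.mpr ⟨q', hq', rfl⟩)
      rw [hnone]
      have htn : q.2.toNat = j := by omega
      rw [htn, List.getD_eq_getElem?_getD, List.getElem?_set_self (by simpa using hj)]
      simp
    · rw [List.find?_cons_of_neg (by simp [hq])]
      have hne : q.2.toNat ≠ j := by
        have := hpos q (List.mem_cons_self ..); omega
      cases hfind : rest.find? (fun q' => q'.2 == (j : Int)) with
      | some _ => rfl
      | none =>
        simp only [List.getD_eq_getElem?_getD]
        rw [List.getElem?_set_ne hne]

-- the inner (per-letter) fold of port B, read back pointwise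
theorem pvInner (g w : List Char) (hlen : g.length ≤ w.length) (c : Char)
    (out0 : List (Option (String × String))) (h0 : out0.length = g.length)
    (j : Nat) (hj : j < g.length) :
    ((PySem.List.enumerate
        ((PySem.List.enumerate g 0).filterMap (fun p => if p.2 = c then some p.1 else none)) 1).foldl
      (fun out q =>
        match PySem.List.pyGet? w q.2 with
        | none => out
        | some wi =>
          out.set q.2.toNat (some (if wi = c then ("green", String.ofList [c])
            else if q.1 ≤ (w.count c : Int) then ("yellow", String.ofList [c])
            else ("grey", String.ofList [c])))) out0).getD j none
    = if g.getD j 'a' = c then some (pvVal g w j) else out0.getD j none := by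
  have hocc : (PySem.List.enumerate g 0).filterMap (fun p => if p.2 = c then some p.1 else none)
      = (pvOccs g c).map (fun i : Nat => ((i : Int))) := by
    rw [pvOccs_eq c g 0]
    apply List.map_congr_left
    intro a _
    ring
  set f : Int × Int → Option (String × String) := fun q =>
    some (if w.getD q.2.toNat 'a' = c then ("green", String.ofList [c])
      else if q.1 ≤ (w.count c : Int) then ("yellow", String.ofList [c])
      else ("grey", String.ofList [c])) with hf
  have hsnd : ∀ q ∈ PySem.List.enumerate ((pvOccs g c).map (fun i : Nat => ((i : Int)))) 1,
      0 ≤ q.2 ∧ q.2.toNat < g.length := by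
    intro q hq
    obtain ⟨t, ht, hp⟩ := (PySem.List.mem_enumerate_iff _ _ _).mp hq
    have hmem : ((pvOccs g c).map (fun i : Nat => ((i : Int))))[t] ∈
        (pvOccs g c).map (fun i : Nat => ((i : Int))) := List.getElem_mem ht
    obtain ⟨a, ha, hv⟩ := List.mem_map.mp hmem
    have hlt := pvOccs_lt c g a ha
    have hq2 : q.2 = (a : Int) := by rw [hp]; exact hv.symm
    constructor <;> omega
  have hcong : ((PySem.List.enumerate ((pvOccs g c).map (fun i : Nat => ((i : Int)))) 1).foldl
      (fun out q =>
        match PySem.List.pyGet? w q.2 with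
        | none => out
        | some wi =>
          out.set q.2.toNat (some (if wi = c then ("green", String.ofList [c])
            else if q.1 ≤ (w.count c : Int) then ("yellow", String.ofList [c])
            else ("grey", String.ofList [c])))) out0)
      = ((PySem.List.enumerate ((pvOccs g c).map (fun i : Nat => ((i : Int)))) 1).foldl
      (fun out q => out.set q.2.toNat (f q)) out0) := by
    apply PySem.List.foldl_congr_mem
    intro acc q hq
    obtain ⟨hq0, hqlt⟩ := hsnd q hq
    have hqw : q.2.toNat < w.length := lt_of_lt_of_le hqlt hlen
    obtain ⟨n, hn⟩ : ∃ n : Nat, q.2 = (n : Int) := ⟨q.2.toNat, by omega⟩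
    have hnw : n < w.length := by omega
    have hgetq : PySem.List.pyGet? w q.2 = some (w.getD q.2.toNat 'a') := by
      rw [hn, PySem.List.pyGet?_natCast, List.getElem?_eq_getElem hnw,
          show ((n : Int)).toNat = n from by omega, List.getD_eq_getElem w 'a' hnw]
    rw [hgetq]
  rw [hocc, hcong,
      pvScatter f none _ out0 j (by omega) ?nd (fun q hq => (hsnd q hq).1)]
  case nd =>
    rw [PySem.List.map_snd_enumerate]
    exact List.Nodup.map Nat.cast_injective
      ((pvOccs_pairwise c g).imp (fun h => Nat.ne_of_lt h))
  have hfind := pvFindG c g 0 1 j hj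
  simp only [add_zero] at hfind
  rw [hfind]
  by_cases hc : g.getD j 'a' = c
  · rw [if_pos hc, if_pos hc]
    simp only [hf, pvVal, hc]
    have h1 : (1 : Int) - 1 + ((g.take (j + 1)).count c : Int) = ((g.take (j + 1)).count c : Int) := by
      ring
    rw [h1, show ((j : Int)).toNat = j by omega]
    by_cases hg : c = w.getD j 'a'
    · rw [if_pos hg.symm, if_pos hg]
    · rw [if_neg (fun h => hg h.symm), if_neg hg]
      by_cases h2 : (g.take (j + 1)).count c ≤ w.count c
      · rw [if_pos (by exact_mod_cast h2), if_pos h2]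
      · rw [if_neg (by exact_mod_cast h2), if_neg h2]
  · rw [if_neg hc, if_neg hc]

-- the outer fold over any list of letters, read back pointwise
theorem pvOuter (g w : List Char) (hlen : g.length ≤ w.length) :
    ∀ (cs : List Char) (out0 : List (Option (String × String))), out0.length = g.length →
      (cs.foldl (fun out c =>
        (PySem.List.enumerate
            ((PySem.List.enumerate g 0).filterMap (fun p => if p.2 = c then some p.1 else none)) 1).foldl
          (fun out q =>
            match PySem.List.pyGet? w q.2 with
            | none => out
            | some wi =>
              out.set q.2.toNat (some (if wi = c then ("green", String.ofList [c])
                else if q.1 ≤ (w.count c : Int) then ("yellow", String.ofList [c])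
                else ("grey", String.ofList [c])))) out) out0).length = g.length ∧
      ∀ j, j < g.length →
      (cs.foldl (fun out c =>
        (PySem.List.enumerate
            ((PySem.List.enumerate g 0).filterMap (fun p => if p.2 = c then some p.1 else none)) 1).foldl
          (fun out q =>
            match PySem.List.pyGet? w q.2 with
            | none => out
            | some wi =>
              out.set q.2.toNat (some (if wi = c then ("green", String.ofList [c])
                else if q.1 ≤ (w.count c : Int) then ("yellow", String.ofList [c])
                else ("grey", String.ofList [c])))) out) out0).getD j none
      = if g.getD j 'a' ∈ cs then some (pvVal g w j) else out0.getD j none := by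
  intro cs
  induction cs with
  | nil => intro out0 h0; exact ⟨h0, by intro j hj; simp⟩
  | cons c cs' ih =>
    intro out0 h0
    simp only [List.foldl_cons]
    have hstep : ∀ (c' : Char) (out : List (Option (String × String))),
        ((PySem.List.enumerate
            ((PySem.List.enumerate g 0).filterMap (fun p => if p.2 = c' then some p.1 else none)) 1).foldl
          (fun out q =>
            match PySem.List.pyGet? w q.2 with
            | none => out
            | some wi =>
              out.set q.2.toNat (some (if wi = c' then ("green", String.ofList [c'])
                else if q.1 ≤ (w.count c' : Int) then ("yellow", String.ofList [c'])
                else ("grey", String.ofList [c'])))) out).length = out.length := by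
      intro c' out
      generalize (PySem.List.enumerate
          ((PySem.List.enumerate g 0).filterMap (fun p => if p.2 = c' then some p.1 else none)) 1) = ps
      induction ps generalizing out with
      | nil => rfl
      | cons q rest ih2 =>
        rw [List.foldl_cons, ih2]
        cases PySem.List.pyGet? w q.2 <;> simp
    have h1 := hstep c out0
    rw [h0] at h1
    obtain ⟨hlen2, hpt⟩ := ih _ h1
    refine ⟨hlen2, ?_⟩
    intro j hj
    rw [hpt j hj, pvInner g w hlen c out0 h0 j hj]
    by_cases hmem : g.getD j 'a' ∈ cs'
    · rw [if_pos hmem, if_pos (List.mem_cons_of_mem _ hmem)]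
    · rw [if_neg hmem]
      by_cases hc : g.getD j 'a' = c
      · rw [if_pos hc, if_pos (by rw [List.mem_cons]; exact Or.inl hc)]
      · rw [if_neg hc, if_neg (by rw [List.mem_cons]; rintro (h | h) <;> [exact hc h; exact hmem h])]

-- ===== VERDICT (by name: the statement is the Claim_ definition above) =====
theorem process_guess_spec : Claim_equal_process_guess := by
  intro guess word _ hpre
  unfold Pre_process_guess at hpre
  unfold Spec_process_guess
  simp only [process_guess, process_guess_alt]
  set g := guess.toList
  set w := word.toList
  have hA := pvA_fold w g hpre g [] [] rfl
  simp only [List.length_nil, Nat.cast_zero, List.nil_append] at hA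
  rw [← List.range_eq_range'] at hA
  rw [hA]
  obtain ⟨hlen, hpt⟩ := pvOuter g w hpre (PySem.Set.ofList g)
      (List.replicate g.length none) (by simp)
  apply List.ext_getElem
  · simp [hlen]
  · intro i h1 h2
    simp only [List.getElem_map, List.getElem_range]
    have hi : i < g.length := by simpa using h1
    have hval := hpt i hi
    have hmem : g.getD i 'a' ∈ PySem.Set.ofList g := by
      rw [PySem.Set.mem_ofList, List.getD_eq_getElem g 'a' hi]
      exact List.getElem_mem hi
    rw [if_pos hmem] at hval
    have hi2 := h2
    rw [List.length_map] at hi2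
    rw [List.getD_eq_getElem _ none hi2] at hval
    simp [hval]
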